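-- pv_equiv track=rewrite | github.com/JIE77777/Wagstaff-Lab | core/indexers/i18n_index.py | _po_unquote
-- ===== SOURCE A (Python) =====
-- from typing import Any, Dict, Iterable, Optional, List, Tuple
--
-- def _po_unquote(s: str) -> str:
--     """Unquote a PO string literal line segment."""
--
--     s = (s or "").strip()
--     if not (s.startswith('"') and s.endswith('"')):
--         return ""
--     inner = s[1:-1]
--     out: List[str] = []
--     i = 0
--     while i < len(inner):
--         ch = inner[i]
--         if ch == "\\" and i + 1 < len(inner):
--             nxt = inner[i + 1]
--             if nxt == "n":
--                 out.append("\n")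
--             elif nxt == "t":
--                 out.append("\t")
--             elif nxt == "r":
--                 out.append("\r")
--             elif nxt == '"':
--                 out.append('"')
--             elif nxt == "\\":
--                 out.append("\\")
--             else:
--                 out.append(nxt)
--             i += 2
--             continue
--         out.append(ch)
--         i += 1
--     return "".join(out)
-- ===== SOURCE B (Python) =====
-- def _po_unquote(s: str) -> str:
--     """Unquote a PO string literal segment via split-on-backslash segments."""
--     s = (s or "").strip()
--     if not (s.startswith('"') and s.endswith('"')):
--         return ""
--     esc = {"n": "\n", "t": "\t", "r": "\r"}
--     parts = s[1:-1].split("\\")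
--     out = [parts[0]]
--     i = 1
--     while i < len(parts):
--         p = parts[i]
--         if p:
--             # the backslash before this segment escaped its first char
--             out.append(esc.get(p[0], p[0]) + p[1:])
--             i += 1
--         else:
--             # empty segment: escaped backslash (or a lone trailing backslash)
--             out.append("\\")
--             i += 1
--             if i < len(parts):
--                 out.append(parts[i])
--                 i += 1
--     return "".join(out)
-- ===== Notes on version B (the rewrite author's own statement) =====
-- stated objective: alternative
-- what changed: Replaced the per-character index-stepping while loop (two-char lookahead with i += 2) by a staged pass: split the inner text on the backslash character into literal segments, copy the first verbatim, map each later segment's first character through the escape table (an empty segment encoding an escaped or trailing backslash), then join the pieces.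
import Mathlib
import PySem

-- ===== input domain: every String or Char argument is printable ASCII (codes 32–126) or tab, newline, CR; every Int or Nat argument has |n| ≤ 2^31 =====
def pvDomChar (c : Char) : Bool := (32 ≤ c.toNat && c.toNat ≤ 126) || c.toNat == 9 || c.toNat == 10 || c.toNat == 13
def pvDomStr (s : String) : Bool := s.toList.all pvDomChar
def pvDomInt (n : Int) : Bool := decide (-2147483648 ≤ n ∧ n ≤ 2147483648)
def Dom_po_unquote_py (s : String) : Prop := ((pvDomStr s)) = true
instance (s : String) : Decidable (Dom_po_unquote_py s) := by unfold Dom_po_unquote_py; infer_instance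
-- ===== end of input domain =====

-- B replaces A's per-character lookahead loop by a staged split-on-backslash pass; objective: alternative decomposition, same cost.

-- ===== PORT A =====
-- the if-elif chain on the character after a backslash, branches in source order
def poEscA (nxt : Char) : Char :=
  if nxt = 'n' then '\n'
  else if nxt = 't' then '\t'
  else if nxt = 'r' then '\r'
  else if nxt = '"' then '"'
  else if nxt = '\\' then '\\'
  else nxt

-- the while loop over inner: consume two chars on an escape (i += 2), else one (i += 1);
-- a final lone backslash (i + 1 = len) is appended literally
def poLoopA : List Char → List Char
  | [] => []
  | ch :: rest =>
    if ch = '\\' then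
      match rest with
      | nxt :: rest2 => poEscA nxt :: poLoopA rest2
      | [] => [ch]
    else ch :: poLoopA rest

def po_unquote_py (s : String) : String :=
  let t := PySem.Str.strip s
  if !(PySem.Str.startswith t "\"" && PySem.Str.endswith t "\"") then ""
  else String.ofList (poLoopA (PySem.List.slice t.toList (some 1) (some (-1))))

-- ===== PORT B =====
-- esc.get(c, c) on the three-entry escape map
def poEscB (c : Char) : Char :=
  (PySem.Dict.mk [('n', '\n'), ('t', '\t'), ('r', '\r')]).getD c c

-- the while loop over parts[1:]: a nonempty part had its first char escaped;
-- an empty part encodes an escaped backslash, consuming the following part literally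
def poGoB : List (List Char) → List Char
  | [] => []
  | [] :: rest =>
      '\\' :: (match rest with
               | [] => []
               | q :: rest2 => q ++ poGoB rest2)
  | (c :: cs) :: rest => poEscB c :: cs ++ poGoB rest

def po_unquote_py_alt (s : String) : String :=
  let t := PySem.Str.strip s
  if !(PySem.Str.startswith t "\"" && PySem.Str.endswith t "\"") then ""
  else
    -- inner.split("\\") ported as List.splitOn '\\' (single-char separator)
    match List.splitOn '\\' (PySem.List.slice t.toList (some 1) (some (-1))) with
    | [] => ""                               -- unreachable: split never returns []
    | p0 :: rest => String.ofList (p0 ++ poGoB rest)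

-- ===== PRECONDITION & SPEC =====
-- A is total (it returns a string on every input), so Pre_ excludes nothing: it only names
-- the guard's two cases — the stripped input is a quoted segment "…" (the unescaping runs)
-- or it is not (A returns "").
def Pre_po_unquote_py (s : String) : Prop :=
  (PySem.Str.startswith (PySem.Str.strip s) "\"" = true ∧
   PySem.Str.endswith (PySem.Str.strip s) "\"" = true) ∨
  ¬ (PySem.Str.startswith (PySem.Str.strip s) "\"" = true ∧
     PySem.Str.endswith (PySem.Str.strip s) "\"" = true)
instance (s : String) : Decidable (Pre_po_unquote_py s) := by unfold Pre_po_unquote_py; infer_instance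

def pvWitness_po_unquote_py : String := "\"ab\\ncd\""

def Spec_po_unquote_py (s : String) (out : String) : Prop := out = po_unquote_py_alt s
instance (s : String) (out : String) : Decidable (Spec_po_unquote_py s out) := by unfold Spec_po_unquote_py; infer_instance

-- ===== CLAIM (what is proved, stated in full; the proofs are below) =====
def Claim_equal_po_unquote_py : Prop := ∀ (s : String), Dom_po_unquote_py s → Pre_po_unquote_py s → Spec_po_unquote_py s (po_unquote_py s)

-- ===== LEMMAS AND PROOFS =====

theorem poEscB_eq_poEscA (c : Char) (hc : c ≠ '\\') : poEscB c = poEscA c := by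
  by_cases h1 : c = 'n'
  · subst h1; rfl
  by_cases h2 : c = 't'
  · subst h2; rfl
  by_cases h3 : c = 'r'
  · subst h3; rfl
  have hl : poEscB c = c := by
    unfold poEscB
    simp [PySem.Dict.getD, PySem.Dict.get?, List.find?,
      beq_eq_false_iff_ne.mpr (Ne.symm h1), beq_eq_false_iff_ne.mpr (Ne.symm h2),
      beq_eq_false_iff_ne.mpr (Ne.symm h3)]
  rw [hl]
  unfold poEscA
  simp only [h1, h2, h3, hc, if_false]
  split_ifs with h4
  · exact h4
  · rfl

theorem splitOn_bs_cons (c : Char) (cs : List Char) :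
    List.splitOn '\\' (c :: cs) =
      if c = '\\' then [] :: List.splitOn '\\' cs
      else (List.splitOn '\\' cs).modifyHead (List.cons c) := by
  simp [List.splitOn, List.splitOnP_cons]

theorem poSplit_key (cs : List Char) :
    (List.splitOn '\\' cs).headI ++ poGoB (List.splitOn '\\' cs).tail = poLoopA cs := by
  induction cs using poLoopA.induct with
  | case1 => rfl
  | case2 nxt rest2 ih =>
    obtain ⟨q, r2, hq⟩ := List.exists_cons_of_ne_nil
      (show List.splitOn '\\' rest2 ≠ [] from List.splitOnP_ne_nil _ rest2)
    rw [hq] at ih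
    simp only [List.headI, List.tail] at ih
    by_cases hn : nxt = '\\'
    · subst hn
      rw [splitOn_bs_cons, if_pos rfl, splitOn_bs_cons, if_pos rfl, hq,
        show poLoopA ('\\' :: '\\' :: rest2) = '\\' :: poLoopA rest2 from rfl, ← ih]
      simp [poGoB]
    · rw [splitOn_bs_cons, if_pos rfl, splitOn_bs_cons, if_neg hn, hq,
        show poLoopA ('\\' :: nxt :: rest2) = poEscA nxt :: poLoopA rest2 from rfl, ← ih,
        ← poEscB_eq_poEscA nxt hn]
      simp [poGoB, List.modifyHead]
  | case3 => rfl
  | case4 ch rest hbs ih =>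
    obtain ⟨q, r2, hq⟩ := List.exists_cons_of_ne_nil
      (show List.splitOn '\\' rest ≠ [] from List.splitOnP_ne_nil _ rest)
    rw [hq] at ih
    simp only [List.headI, List.tail] at ih
    rw [splitOn_bs_cons, if_neg hbs, hq, poLoopA.eq_def]
    simp [List.modifyHead, hbs, ← ih]

-- ===== VERDICT (by name: the statement is the Claim_ definition above) =====
theorem po_unquote_py_spec : Claim_equal_po_unquote_py := by
  intro s _ _
  unfold Spec_po_unquote_py po_unquote_py po_unquote_py_alt
  cases h : (!(PySem.Str.startswith (PySem.Str.strip s) "\"" &&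
      PySem.Str.endswith (PySem.Str.strip s) "\"")) with
  | true => simp only [h, if_true]
  | false =>
    simp only [h, Bool.false_eq_true, if_false]
    rw [← poSplit_key]
    cases h2 : List.splitOn '\\' (PySem.List.slice (PySem.Str.strip s).toList (some 1) (some (-1))) with
    | nil => exact absurd h2 (List.splitOnP_ne_nil _ _)
    | cons p0 rest => simp [List.headI]
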